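-- pv_equiv track=rewrite | github.com/bicikar/anneal_ttopt | src/utils.py | find_edge_index
-- ===== SOURCE A (Python) =====
-- def find_edge_index(arr, node):
--     one_start = False
--     n_index = -1
--     for index, el in enumerate(arr):
--         if node in el:
--             if one_start:
--                 return -1
--             n_index = index
--             one_start = True
--     return n_index
-- ===== SOURCE B (Python) =====
-- def find_edge_index(arr, node):
--     # Pass 1: count how many elements contain node.
--     matches = sum(1 for el in arr if node in el)
--     if matches != 1:
--         return -1
--     # Pass 2: only reached when exactly one element matches; find its index.
--     return next(i for i, el in enumerate(arr) if node in el)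
-- ===== Notes on version B (the rewrite author's own statement) =====
-- stated objective: alternative
-- what changed: Replaced A's single stateful scan (one_start flag, early return on second match) by two staged passes: a counting pass that decides uniqueness first, then a separate search pass for the index, run only when the count is exactly one.
import Mathlib
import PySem

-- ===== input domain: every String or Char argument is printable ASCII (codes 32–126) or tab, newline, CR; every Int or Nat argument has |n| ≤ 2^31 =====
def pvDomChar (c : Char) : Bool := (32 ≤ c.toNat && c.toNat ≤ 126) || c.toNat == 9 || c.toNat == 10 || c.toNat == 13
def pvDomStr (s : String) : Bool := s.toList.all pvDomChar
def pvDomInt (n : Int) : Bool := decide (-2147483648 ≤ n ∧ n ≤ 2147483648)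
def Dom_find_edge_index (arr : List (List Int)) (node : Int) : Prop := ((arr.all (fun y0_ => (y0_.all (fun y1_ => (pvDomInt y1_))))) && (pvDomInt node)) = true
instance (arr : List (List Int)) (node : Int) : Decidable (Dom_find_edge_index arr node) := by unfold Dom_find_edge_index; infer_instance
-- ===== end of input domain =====

-- B replaces A's single stateful scan (one_start flag, early return) by two staged passes:
-- count the matching elements first, then search for the index only when the count is one.


-- ===== PORT A =====
-- A's for-loop with the one_start flag, n_index accumulator and early 'return -1'.
def findEdgeLoopA (node : Int) : List (List Int) → Int → Bool → Int → Int
  | [], _, _, n_index => n_index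
  | el :: rest, index, one_start, n_index =>
    if node ∈ el then
      if one_start then -1
      else findEdgeLoopA node rest (index + 1) true index
    else findEdgeLoopA node rest (index + 1) one_start n_index

def find_edge_index (arr : List (List Int)) (node : Int) : Int :=
  findEdgeLoopA node arr 0 false (-1)

-- ===== PORT B =====
-- matches = sum(1 for el in arr if node in el); if matches != 1: return -1;
-- return next(i for i, el in enumerate(arr) if node in el)
def find_edge_index_alt (arr : List (List Int)) (node : Int) : Int :=
  let mcount := arr.countP (fun el => decide (node ∈ el))
  if mcount ≠ 1 then -1
  else
    match (PySem.List.enumerate arr).find? (fun p => decide (node ∈ p.2)) with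
    | some p => p.1
    | none => -1  -- unreachable: matches = 1 guarantees a match exists

-- ===== PRECONDITION & SPEC =====
def Spec_find_edge_index (arr : List (List Int)) (node : Int) (out : Int) : Prop := out = find_edge_index_alt arr node
instance (arr : List (List Int)) (node : Int) (out : Int) : Decidable (Spec_find_edge_index arr node out) := by unfold Spec_find_edge_index; infer_instance

-- ===== CLAIM (what is proved, stated in full; the proofs are below) =====
def Claim_equal_find_edge_index : Prop := ∀ (arr : List (List Int)) (node : Int), Dom_find_edge_index arr node → Spec_find_edge_index arr node (find_edge_index arr node)

-- ===== LEMMAS AND PROOFS =====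

-- proof-side list of matching indices starting at s; characterises both sides
def hitsF (node : Int) : List (List Int) → Int → List Int
  | [], _ => []
  | el :: rest, s => if node ∈ el then s :: hitsF node rest (s + 1) else hitsF node rest (s + 1)

lemma hitsF_nil_iff (node : Int) (arr : List (List Int)) (s : Int) :
    hitsF node arr s = [] ↔ ¬ arr.any (fun el => decide (node ∈ el)) := by
  induction arr generalizing s with
  | nil => simp [hitsF]
  | cons el rest ih =>
    by_cases h : node ∈ el <;> simp [hitsF, h, ih]

lemma countP_eq_hits_length (node : Int) (arr : List (List Int)) (s : Int) :
    arr.countP (fun el => decide (node ∈ el)) = (hitsF node arr s).length := by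
  induction arr generalizing s with
  | nil => simp [hitsF]
  | cons el rest ih =>
    by_cases h : node ∈ el <;> simp [hitsF, h, List.countP_cons, ih (s + 1)]

lemma find?_eq_hits_head (node : Int) (arr : List (List Int)) (s : Int) :
    ((PySem.List.enumerate arr s).find? (fun p => decide (node ∈ p.2))).map (·.1)
      = (hitsF node arr s).head? := by
  induction arr generalizing s with
  | nil => simp [PySem.List.enumerate_nil, hitsF]
  | cons el rest ih =>
    by_cases h : node ∈ el <;>
      simp [PySem.List.enumerate_cons, List.find?, h, hitsF, ih]

lemma loopA_true (node : Int) (arr : List (List Int)) (i j : Int) :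
    findEdgeLoopA node arr i true j = if arr.any (fun el => decide (node ∈ el)) then -1 else j := by
  induction arr generalizing i with
  | nil => simp [findEdgeLoopA]
  | cons el rest ih =>
    by_cases h : node ∈ el <;> simp [findEdgeLoopA, h, ih]

lemma loopA_eq_hits (node : Int) (arr : List (List Int)) (i : Int) :
    findEdgeLoopA node arr i false (-1)
      = (match hitsF node arr i with | [h] => h | _ => -1) := by
  induction arr generalizing i with
  | nil => simp [findEdgeLoopA, hitsF]
  | cons el rest ih =>
    by_cases h : node ∈ el
    · simp only [findEdgeLoopA, h, if_true, hitsF, loopA_true]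
      by_cases hr : rest.any (fun el => decide (node ∈ el))
      · rcases hx : hitsF node rest (i + 1) with _ | ⟨a, t⟩
        · exact absurd ((hitsF_nil_iff node rest (i + 1)).1 hx) (by simpa using hr)
        · simp [hr]
      · rw [(hitsF_nil_iff node rest (i + 1)).2 (by simpa using hr)]
        simp [hr]
    · simp only [findEdgeLoopA, h, if_false, hitsF, ih]

lemma alt_eq_hits (node : Int) (arr : List (List Int)) :
    find_edge_index_alt arr node
      = (match hitsF node arr 0 with | [h] => h | _ => -1) := by
  unfold find_edge_index_alt
  rw [countP_eq_hits_length node arr 0]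
  have hh := find?_eq_hits_head node arr 0
  rcases hx : hitsF node arr 0 with _ | ⟨a, _ | ⟨b, t⟩⟩ <;>
    rw [hx] at hh <;>
    rcases hf : (PySem.List.enumerate arr 0).find? (fun p => decide (node ∈ p.2)) with _ | p <;>
      rw [hf] at hh <;> simp_all

-- ===== VERDICT (by name: the statement is the Claim_ definition above) =====
theorem find_edge_index_spec : Claim_equal_find_edge_index := by
  intro arr node _
  unfold Spec_find_edge_index find_edge_index
  rw [loopA_eq_hits, alt_eq_hits]
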